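-- pv_equiv track=rewrite | github.com/milavdabgar/milav-next | ai_voiceover_system/slidev_to_video.py | _split_content_robust
-- ===== SOURCE A (Python) =====
-- def _split_content_robust(content):
--     """Split content by '---' separators, but ignore those inside code blocks."""
--     lines = content.split('\n')
--     sections = []
--     current_section = []
--     in_code_block = False
--
--     for i, line in enumerate(lines):
--         stripped = line.strip()
--
--         # Toggle code block state
--         if stripped.startswith('```'):
--             in_code_block = not in_code_block
--
--         # Check for separator
--         # Must be '---', not inside code block
--         is_separator = (stripped == '---' and not in_code_block)
--
--         if is_separator:
--             # If it's a separator, push current section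
--             if current_section:
--                 sections.append('\n'.join(current_section))
--             else:
--                 sections.append('') # Empty section (e.g. frontmatter start)
--
--             current_section = []
--         else:
--             current_section.append(line)
--
--     # Append final section
--     if current_section:
--         sections.append('\n'.join(current_section))
--
--     return sections
-- ===== SOURCE B (Python) =====
-- def _split_content_robust(content):
--     """Split content by '---' separators, but ignore those inside code blocks.
--
--     Two-pass decomposition: first collect the indices of separator lines,
--     then cut the line list at those indices and join each slice.
--     """
--     lines = content.split('\n')
--
--     cuts = []
--     in_code = False
--     for i, line in enumerate(lines):
--         s = line.strip()
--         if s.startswith('```'):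
--             in_code = not in_code
--         if s == '---' and not in_code:
--             cuts.append(i)
--
--     groups = []
--     prev = 0
--     for c in cuts:
--         groups.append(lines[prev:c])
--         prev = c + 1
--     groups.append(lines[prev:])
--
--     sections = ['\n'.join(g) for g in groups]
--     if not groups[-1]:
--         sections.pop()
--     return sections
-- ===== Notes on version B (the rewrite author's own statement) =====
-- stated objective: alternative
-- what changed: Replaces the streaming accumulate-and-flush loop by a two-pass decomposition: one scan collects the indices of separator lines, then the line list is cut at those indices into slices that are joined; the trailing slice is dropped when empty.
import Mathlib
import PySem

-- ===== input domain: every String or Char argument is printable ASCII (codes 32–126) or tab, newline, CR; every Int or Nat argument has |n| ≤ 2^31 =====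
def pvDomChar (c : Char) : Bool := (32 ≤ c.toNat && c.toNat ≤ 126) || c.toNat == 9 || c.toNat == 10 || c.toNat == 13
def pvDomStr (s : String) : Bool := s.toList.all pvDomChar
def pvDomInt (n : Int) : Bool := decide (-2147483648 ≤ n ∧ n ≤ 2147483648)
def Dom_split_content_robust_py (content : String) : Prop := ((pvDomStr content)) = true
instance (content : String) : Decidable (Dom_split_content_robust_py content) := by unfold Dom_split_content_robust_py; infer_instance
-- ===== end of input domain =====

-- B replaces A's streaming accumulate-and-flush loop by a two-pass decomposition (collect separator
-- indices, then cut the line list into slices and join them); objective: alternative, same cost.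


-- ===== PORT A =====
-- one iteration of A's for-loop; state = (sections, current_section, in_code_block)
def aStep (st : List String × List String × Bool) (line : String) : List String × List String × Bool :=
  let stripped := PySem.Str.strip line
  let inCode := if PySem.Str.startswith stripped "```" then !st.2.2 else st.2.2
  if stripped == "---" && !inCode then
    ((if st.2.1.isEmpty then st.1 ++ [""] else st.1 ++ [PySem.Str.join "\n" st.2.1]), [], inCode)
  else
    (st.1, st.2.1 ++ [line], inCode)

def split_content_robust_py (content : String) : List String :=
  let lines := (PySem.Str.split? content "\n").getD []   -- sep "\n" ≠ "": split? is never none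
  let st := lines.foldl aStep ([], [], false)
  if st.2.1.isEmpty then st.1 else st.1 ++ [PySem.Str.join "\n" st.2.1]

-- ===== PORT B =====
-- B's first pass: collect the indices of separator lines; state = (cuts, in_code)
def bCutStep (st : List Int × Bool) (p : Int × String) : List Int × Bool :=
  let s := PySem.Str.strip p.2
  let inCode := if PySem.Str.startswith s "```" then !st.2 else st.2
  (if s == "---" && !inCode then st.1 ++ [p.1] else st.1, inCode)

-- B's second pass: cut the line list at the collected indices; state = (groups, prev)
def bGroupStep (lines : List String) (st : List (List String) × Int) (c : Int) : List (List String) × Int :=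
  (st.1 ++ [PySem.List.slice lines (some st.2) (some c)], c + 1)

def split_content_robust_py_alt (content : String) : List String :=
  let lines := (PySem.Str.split? content "\n").getD []   -- sep "\n" ≠ "": split? is never none
  let cuts := ((PySem.List.enumerate lines).foldl bCutStep ([], false)).1
  let pg := cuts.foldl (bGroupStep lines) ([], 0)
  let groups := pg.1 ++ [PySem.List.slice lines (some pg.2)]
  let sections := groups.map (fun g => PySem.Str.join "\n" g)
  if (PySem.List.pyGetD groups (-1) []).isEmpty then sections.dropLast else sections

-- ===== PRECONDITION & SPEC =====
def Spec_split_content_robust_py (content : String) (out : List String) : Prop := out = split_content_robust_py_alt content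
instance (content : String) (out : List String) : Decidable (Spec_split_content_robust_py content out) := by unfold Spec_split_content_robust_py; infer_instance

-- ===== CLAIM (what is proved, stated in full; the proofs are below) =====
def Claim_equal_split_content_robust_py : Prop := ∀ (content : String), Dom_split_content_robust_py content → Spec_split_content_robust_py content (split_content_robust_py content)

-- ===== LEMMAS AND PROOFS =====

-- the code-block state after a line, and whether the line is a separator
def pvNext (code : Bool) (l : String) : Bool :=
  if PySem.Str.startswith (PySem.Str.strip l) "```" then !code else code

def pvFlag (code : Bool) (l : String) : Bool :=
  (PySem.Str.strip l == "---") && !(pvNext code l)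

-- the groups of lines between separators (always nonempty; last = lines after the last separator)
def pvChunks : List String → Bool → List (List String)
  | [], _ => [[]]
  | l :: ls, code =>
    if pvFlag code l then [] :: pvChunks ls (pvNext code l)
    else match pvChunks ls (pvNext code l) with
      | g :: gs => (l :: g) :: gs
      | [] => [[l]]

-- absolute indices of separator lines, starting at index i
def pvCuts : List String → Int → Bool → List Int
  | [], _, _ => []
  | l :: ls, i, code =>
    if pvFlag code l then i :: pvCuts ls (i + 1) (pvNext code l)
    else pvCuts ls (i + 1) (pvNext code l)

def pvMapHead (cur : List String) : List (List String) → List (List String)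
  | [] => []
  | g :: gs => (cur ++ g) :: gs

-- join every group, dropping the last group when it is empty
def pvFinish : List (List String) → List String
  | [] => []
  | [g] => if g.isEmpty then [] else [PySem.Str.join "\n" g]
  | g :: g' :: gs => PySem.Str.join "\n" g :: pvFinish (g' :: gs)

-- B's second pass, written structurally (slices of M at the cut points, then the tail slice)
def pvGroups (M : List String) : List Int → Int → List (List String)
  | [], prev => [PySem.List.slice M (some prev)]
  | c :: cs, prev => PySem.List.slice M (some prev) (some c) :: pvGroups M cs (c + 1)

theorem pvChunks_ne_nil (ls : List String) (code : Bool) : pvChunks ls code ≠ [] := by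
  cases ls with
  | nil => simp [pvChunks]
  | cons l ls =>
    simp only [pvChunks]
    split
    · simp
    · split <;> simp

theorem pvMapHead_nil (gs : List (List String)) : pvMapHead [] gs = gs := by
  cases gs <;> simp [pvMapHead]

theorem pvFinish_cons (g : List String) (gs : List (List String)) (h : gs ≠ []) :
    pvFinish (g :: gs) = PySem.Str.join "\n" g :: pvFinish gs := by
  cases gs with
  | nil => exact absurd rfl h
  | cons g' gs' => rfl

theorem aStep_eq (secs cur : List String) (code : Bool) (l : String) :
    aStep (secs, cur, code) l =
      if pvFlag code l then (secs ++ [PySem.Str.join "\n" cur], [], pvNext code l)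
      else (secs, cur ++ [l], pvNext code l) := by
  simp only [aStep, pvFlag, pvNext]
  by_cases hc : cur = [] <;> simp [hc]
  rfl

theorem aLoop_eq (ls : List String) : ∀ (secs cur : List String) (code : Bool),
    (if (ls.foldl aStep (secs, cur, code)).2.1.isEmpty
      then (ls.foldl aStep (secs, cur, code)).1
      else (ls.foldl aStep (secs, cur, code)).1 ++
        [PySem.Str.join "\n" (ls.foldl aStep (secs, cur, code)).2.1])
    = secs ++ pvFinish (pvMapHead cur (pvChunks ls code)) := by
  induction ls with
  | nil =>
    intro secs cur code
    by_cases hc : cur = [] <;> simp [pvChunks, pvMapHead, pvFinish, hc]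
  | cons l ls ih =>
    intro secs cur code
    simp only [List.foldl_cons, aStep_eq]
    by_cases hf : pvFlag code l <;> simp only [hf, if_true, if_false, Bool.false_eq_true]
    · rw [ih, pvMapHead_nil]
      simp only [pvChunks, hf, if_true, pvMapHead, List.append_nil]
      rw [pvFinish_cons _ _ (pvChunks_ne_nil _ _)]
      simp
    · rw [ih]
      simp only [pvChunks, hf, if_false, Bool.false_eq_true]
      obtain ⟨g, gs, hC⟩ := List.exists_cons_of_ne_nil (pvChunks_ne_nil ls (pvNext code l))
      rw [hC]
      simp [pvMapHead]

theorem bCuts_eq (ls : List String) : ∀ (i : Int) (acc : List Int) (code : Bool),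
    ((PySem.List.enumerate ls i).foldl bCutStep (acc, code)).1 = acc ++ pvCuts ls i code := by
  induction ls with
  | nil => intro i acc code; simp [PySem.List.enumerate, pvCuts]
  | cons l ls ih =>
    intro i acc code
    rw [PySem.List.enumerate_cons, List.foldl_cons]
    have hstep : bCutStep (acc, code) (i, l) =
        ((if pvFlag code l then acc ++ [i] else acc), pvNext code l) := rfl
    rw [hstep]
    by_cases hf : pvFlag code l <;> simp [pvCuts, hf, ih]

theorem bGroupsFold_eq (M : List String) (cuts : List Int) :
    ∀ (acc : List (List String)) (prev : Int),
    (cuts.foldl (bGroupStep M) (acc, prev)).1 ++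
      [PySem.List.slice M (some (cuts.foldl (bGroupStep M) (acc, prev)).2)]
    = acc ++ pvGroups M cuts prev := by
  induction cuts with
  | nil => intro acc prev; simp [pvGroups]
  | cons c cs ih =>
    intro acc prev
    rw [List.foldl_cons]
    have hstep : bGroupStep M (acc, prev) c =
        (acc ++ [PySem.List.slice M (some prev) (some c)], c + 1) := rfl
    rw [hstep, ih]
    simp [pvGroups]

theorem pvCuts_lb (ls : List String) : ∀ (i : Int) (code : Bool) (c : Int),
    c ∈ pvCuts ls i code → i ≤ c := by
  induction ls with
  | nil => intro i code c hc; simp [pvCuts] at hc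
  | cons l ls ih =>
    intro i code c hc
    by_cases hf : pvFlag code l <;>
      simp only [pvCuts, hf, if_true, if_false, Bool.false_eq_true] at hc
    · rcases List.mem_cons.mp hc with rfl | h
      · exact le_refl c
      · have := ih _ _ _ h; omega
    · have := ih _ _ _ hc; omega

theorem pvGroups_shift (cuts : List Int) (L ls : List String) (l : String)
    (hb : ∀ c ∈ cuts, (L.length : Int) + 1 ≤ c) :
    pvGroups (L ++ l :: ls) cuts (L.length : Int) =
      pvMapHead [l] (pvGroups (L ++ l :: ls) cuts ((L.length : Int) + 1)) := by
  have hM : L ++ l :: ls = (L ++ [l]) ++ ls := by simp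
  cases cuts with
  | nil =>
    simp only [pvGroups, pvMapHead]
    rw [PySem.List.slice_from _ (by positivity), PySem.List.slice_from _ (by positivity)]
    have h1 : ((L.length : Int)).toNat = L.length := by omega
    have h2 : ((L.length : Int) + 1).toNat = L.length + 1 := by omega
    rw [h1, h2]
    rw [List.drop_left]
    rw [hM, List.drop_left' (by simp)]
    simp
  | cons c cs =>
    have hc := hb c (List.mem_cons_self)
    simp only [pvGroups, pvMapHead]
    have h1 : PySem.List.slice (L ++ l :: ls) (some (L.length : Int)) (some c)
        = l :: PySem.List.slice (L ++ l :: ls) (some ((L.length : Int) + 1)) (some c) := by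
      rw [PySem.List.slice_toNat _ (by positivity) (by omega),
          PySem.List.slice_toNat _ (by positivity) (by omega)]
      have h1 : ((L.length : Int)).toNat = L.length := by omega
      have h2 : ((L.length : Int) + 1).toNat = L.length + 1 := by omega
      rw [h1, h2, List.drop_left]
      rw [hM, List.drop_left' (by simp)]
      have h3 : c.toNat - L.length = (c.toNat - (L.length + 1)) + 1 := by omega
      rw [h3, List.take_succ_cons]
    rw [h1]
    simp

theorem bMain (ls : List String) : ∀ (code : Bool) (L : List String),
    pvGroups (L ++ ls) (pvCuts ls (L.length : Int) code) (L.length : Int) = pvChunks ls code := by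
  induction ls with
  | nil =>
    intro code L
    simp only [pvCuts, pvGroups, pvChunks, List.append_nil]
    rw [PySem.List.slice_from _ (by positivity)]
    have h1 : ((L.length : Int)).toNat = L.length := by omega
    rw [h1]; simp
  | cons l ls ih =>
    intro code L
    have hlen : ((L ++ [l]).length : Int) = (L.length : Int) + 1 := by simp
    by_cases hf : pvFlag code l <;>
      simp only [pvCuts, pvChunks, hf, if_true, if_false, Bool.false_eq_true]
    · simp only [pvGroups]
      have h0 : PySem.List.slice (L ++ l :: ls) (some (L.length : Int)) (some (L.length : Int)) = [] := by
        rw [PySem.List.slice_toNat _ (by positivity) (by positivity)]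
        simp
      rw [h0]
      have := ih (pvNext code l) (L ++ [l])
      rw [hlen] at this
      rw [show (L ++ [l]) ++ ls = L ++ l :: ls by simp] at this
      rw [this]
    · have hb : ∀ c ∈ pvCuts ls ((L.length : Int) + 1) (pvNext code l), (L.length : Int) + 1 ≤ c :=
        fun c hc => pvCuts_lb ls _ _ c hc
      rw [pvGroups_shift _ _ _ _ hb]
      have := ih (pvNext code l) (L ++ [l])
      rw [hlen] at this
      rw [show (L ++ [l]) ++ ls = L ++ l :: ls by simp] at this
      rw [this]
      obtain ⟨g, gs, hC⟩ := List.exists_cons_of_ne_nil (pvChunks_ne_nil ls (pvNext code l))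
      rw [hC]
      simp [pvMapHead]

theorem pyGetD_neg_one (gs : List (List String)) (h : gs ≠ []) :
    PySem.List.pyGetD gs (-1) [] = gs.getLast h := by
  have hn : 1 ≤ gs.length := List.length_pos_of_ne_nil h
  simp only [PySem.List.pyGetD, PySem.List.pyGet?, PySem.List.pyIdx?]
  rw [if_neg (by omega), if_pos (by omega)]
  simp only [Option.bind_some]
  rw [List.getLast_eq_getElem]
  have : (-(-1 : Int)).toNat = 1 := by omega
  rw [this]
  rw [List.getElem?_eq_getElem (by omega)]
  rfl

theorem bFinish_eq (gs : List (List String)) (h : gs ≠ []) :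
    (if (PySem.List.pyGetD gs (-1) []).isEmpty
      then (gs.map (fun g => PySem.Str.join "\n" g)).dropLast
      else gs.map (fun g => PySem.Str.join "\n" g)) = pvFinish gs := by
  rw [pyGetD_neg_one gs h]
  induction gs with
  | nil => exact absurd rfl h
  | cons g tl ih =>
    cases tl with
    | nil =>
      simp only [List.getLast_singleton, List.map_cons, List.map_nil, pvFinish]
      by_cases hg : g = [] <;> simp [hg]
    | cons g' tl' =>
      rw [List.getLast_cons (by simp)]
      rw [pvFinish, ← ih (by simp)]
      simp only [List.map_cons]
      rw [List.dropLast_cons_of_ne_nil (by simp)]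
      by_cases hl : ((g' :: tl').getLast (by simp)).isEmpty <;> simp [hl]

-- ===== VERDICT (by name: the statement is the Claim_ definition above) =====
theorem split_content_robust_py_spec : Claim_equal_split_content_robust_py := by
  intro content _
  unfold Spec_split_content_robust_py split_content_robust_py split_content_robust_py_alt
  simp only []   -- zeta-reduce the let-bindings of both ports
  rw [bCuts_eq, bGroupsFold_eq]
  have hmain := bMain ((PySem.Str.split? content "\n").getD []) false []
  simp only [List.nil_append, List.length_nil, Nat.cast_zero] at hmain
  simp only [List.nil_append]
  rw [hmain]
  rw [bFinish_eq _ (pvChunks_ne_nil _ _)]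
  rw [aLoop_eq]
  rw [pvMapHead_nil]
  simp
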